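-- pv_equiv track=rewrite | github.com/kemperlab/cartan-quantum-synthesizer | paperpauli.py | createK
-- ===== SOURCE A (Python) =====
-- def createK(abeliank, hlist):
--
--     if len(hlist) == 0:
--         return abeliank
--     else:
--         newhlist = hlist.copy()
--
--         h = newhlist[0]
--         newhlist.pop(0)
--
--         oneless = createK(abeliank,newhlist)
--
--         return  oneless + h + oneless
-- ===== SOURCE B (Python) =====
-- def createK(abeliank, hlist):
--     result = abeliank
--     for h in reversed(hlist):
--         result = result + h + result
--     return result
-- ===== Notes on version B (the rewrite author's own statement) =====
-- stated objective: simpler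
-- what changed: Replaced the copy-and-pop recursion with a single bottom-up loop over reversed(hlist) that accumulates result = result + h + result.
import Mathlib
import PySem

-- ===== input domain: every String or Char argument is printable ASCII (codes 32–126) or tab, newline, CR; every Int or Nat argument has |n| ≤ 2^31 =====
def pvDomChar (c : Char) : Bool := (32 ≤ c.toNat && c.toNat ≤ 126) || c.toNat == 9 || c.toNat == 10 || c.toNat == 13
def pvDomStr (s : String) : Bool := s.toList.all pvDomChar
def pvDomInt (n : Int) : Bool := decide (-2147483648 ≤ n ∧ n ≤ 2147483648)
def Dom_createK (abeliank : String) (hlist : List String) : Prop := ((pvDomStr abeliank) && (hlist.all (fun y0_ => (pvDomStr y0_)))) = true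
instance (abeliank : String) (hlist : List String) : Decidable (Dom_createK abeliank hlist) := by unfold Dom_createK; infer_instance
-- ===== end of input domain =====

-- B replaces A's copy-and-pop recursion with a single loop over reversed(hlist); return values are identical (objective: simpler).

-- ===== PORT A =====
-- A copies hlist, pops the head h, recurses on the rest, and returns oneless + h + oneless.
def createK (abeliank : String) (hlist : List String) : String :=
  if hlist.length == 0 then
    abeliank
  else
    -- newhlist = hlist.copy(); h = newhlist[0]; newhlist.pop(0)
    match hlist with
    | [] => abeliank  -- unreachable (length ≠ 0)
    | h :: rest =>
      let oneless := createK abeliank rest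
      oneless ++ h ++ oneless

-- ===== PORT B =====
-- result = abeliank; for h in reversed(hlist): result = result + h + result
def createK_alt (abeliank : String) (hlist : List String) : String :=
  hlist.reverse.foldl (fun result h => result ++ h ++ result) abeliank

-- ===== PRECONDITION & SPEC =====
def Spec_createK (abeliank : String) (hlist : List String) (out : String) : Prop := out = createK_alt abeliank hlist
instance (abeliank : String) (hlist : List String) (out : String) : Decidable (Spec_createK abeliank hlist out) := by unfold Spec_createK; infer_instance

-- ===== CLAIM (what is proved, stated in full; the proofs are below) =====
def Claim_equal_createK : Prop := ∀ (abeliank : String) (hlist : List String), Dom_createK abeliank hlist → Spec_createK abeliank hlist (createK abeliank hlist)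

-- ===== LEMMAS AND PROOFS =====

theorem createK_alt_cons (a h : String) (t : List String) :
    createK_alt a (h :: t) = createK_alt a t ++ h ++ createK_alt a t := by
  simp [createK_alt, List.foldl_append]

theorem createK_eq_alt (a : String) (l : List String) : createK a l = createK_alt a l := by
  induction l with
  | nil => simp [createK, createK_alt]
  | cons h t ih => rw [createK, createK_alt_cons]; simp [ih]

-- ===== VERDICT (by name: the statement is the Claim_ definition above) =====
theorem createK_spec : Claim_equal_createK := by
  intro a l _
  exact createK_eq_alt a l
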